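-- pv_equiv track=rewrite | github.com/giladondon/ANONA | AnonaAI/Features.py | backspace_count
-- ===== SOURCE A (Python) =====
-- ENTER_KEY_CODE = 13
--
-- BACKSPACE_KEY_CODE = 8
--
-- def backspace_count(od):
--     """
--     :param od: key data of user ending with enter(key code 13).
--     :return:
--     :type od: ordered dictionary
--     """
--     backspace_ratio = []
--
--     key_count = 0
--     backspace_count = 0
--
--     for item in od:
--         key_count += 1
--         if od[item] == ENTER_KEY_CODE:
--             backspace_ratio.append([backspace_count, key_count])
--             key_count = 0
--             backspace_count = 0
--         elif od[item] == BACKSPACE_KEY_CODE: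
--                 backspace_count += 1
--
--     return backspace_ratio
-- ===== SOURCE B (Python) =====
-- ENTER_KEY_CODE = 13
--
-- BACKSPACE_KEY_CODE = 8
--
-- def backspace_count(od):
--     # Pass 1: split the values into segments, each segment ending with (and
--     # including) its ENTER key; trailing keystrokes not followed by an ENTER
--     # are dropped.
--     segments = []
--     current = []
--     for value in od.values():
--         current.append(value)
--         if value == ENTER_KEY_CODE:
--             segments.append(current)
--             current = []
--     # Pass 2: reduce each segment to [backspace count, segment length].
--     return [[segment.count(BACKSPACE_KEY_CODE), len(segment)] for segment in segments]
-- ===== Notes on version B (the rewrite author's own statement) =====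
-- stated objective: alternative
-- what changed: A keeps running key/backspace counters mutated inside one loop; B first splits the value sequence into ENTER-terminated segments (dropping the unfinished tail) and then, in a separate pass, reduces each segment to [backspaces, length] with list.count/len.
import Mathlib
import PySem

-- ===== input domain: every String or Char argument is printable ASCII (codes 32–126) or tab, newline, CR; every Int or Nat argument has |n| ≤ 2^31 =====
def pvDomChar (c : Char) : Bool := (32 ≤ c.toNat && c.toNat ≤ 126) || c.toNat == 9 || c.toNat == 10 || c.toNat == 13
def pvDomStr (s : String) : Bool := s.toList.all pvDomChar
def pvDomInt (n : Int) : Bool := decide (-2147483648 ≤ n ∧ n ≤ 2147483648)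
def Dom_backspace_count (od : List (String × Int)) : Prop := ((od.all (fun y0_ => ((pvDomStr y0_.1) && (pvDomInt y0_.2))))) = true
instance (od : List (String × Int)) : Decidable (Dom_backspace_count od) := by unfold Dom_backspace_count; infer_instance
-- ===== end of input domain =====

-- B groups the values into ENTER-terminated segments first and reduces each segment
-- in a second pass, instead of A's single loop with running counters (objective: alternative).

-- ===== PORT A =====
-- `for item in od` iterates the keys, `od[item]` is the dict lookup; the key is always
-- present (it comes from od itself), so the getD default 0 is never used.
def backspace_count (od : List (String × Int)) : List (List Int) :=
  (od.foldl
    (fun (st : List (List Int) × Int × Int) item =>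
      let br := st.1
      let kc := st.2.1 + 1          -- key_count += 1
      let bc := st.2.2
      let v := (PySem.Dict.mk od).getD item.1 0   -- od[item]
      if v == 13 then (br ++ [[bc, kc]], 0, 0)
      else if v == 8 then (br, kc, bc + 1)
      else (br, kc, bc))
    ([], 0, 0)).1

-- ===== PORT B =====
-- Pass 1: split the values into segments, each ending with its ENTER; drop the tail.
def pvSegments : List Int → List Int → List (List Int)
  | [], _ => []
  | v :: rest, cur =>
    if v == (13 : Int) then (cur ++ [v]) :: pvSegments rest []
    else pvSegments rest (cur ++ [v])

-- Pass 2: reduce each segment to [backspace count, length].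
def backspace_count_alt (od : List (String × Int)) : List (List Int) :=
  (pvSegments (od.map Prod.snd) []).map
    (fun seg => [(seg.count 8 : Int), (seg.length : Int)])

-- ===== PRECONDITION & SPEC =====
-- Pre_ requires pairwise-distinct keys: A's parameter is a Python dict and can never
-- hold duplicate keys, so association lists with repeated keys represent no dict input.
def Pre_backspace_count (od : List (String × Int)) : Prop := (od.map Prod.fst).Nodup
instance (od : List (String × Int)) : Decidable (Pre_backspace_count od) := by
  unfold Pre_backspace_count; infer_instance

def pvWitness_backspace_count : (List (String × Int)) := [("a", 8), ("b", 13), ("c", 5)]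

def Spec_backspace_count (od : List (String × Int)) (out : List (List Int)) : Prop := out = backspace_count_alt od
instance (od : List (String × Int)) (out : List (List Int)) : Decidable (Spec_backspace_count od out) := by unfold Spec_backspace_count; infer_instance

-- ===== CLAIM (what is proved, stated in full; the proofs are below) =====
def Claim_equal_backspace_count : Prop := ∀ (od : List (String × Int)), Dom_backspace_count od → Pre_backspace_count od → Spec_backspace_count od (backspace_count od)

-- ===== LEMMAS AND PROOFS =====

-- The pure-values step of A's loop (the dict lookup resolved to the pair's value).
def pvStepV (st : List (List Int) × Int × Int) (v : Int) : List (List Int) × Int × Int :=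
  let br := st.1
  let kc := st.2.1 + 1
  let bc := st.2.2
  if v == 13 then (br ++ [[bc, kc]], 0, 0)
  else if v == 8 then (br, kc, bc + 1)
  else (br, kc, bc)

-- Under distinct keys the lookup od[item] returns item's own value.
theorem pv_lookup_eq (od : List (String × Int)) (h : (od.map Prod.fst).Nodup)
    (item : String × Int) (hm : item ∈ od) :
    (PySem.Dict.mk od).getD item.1 0 = item.2 := by
  exact PySem.Dict.getD_of_mem_items (d := PySem.Dict.mk od) (by simpa using hm) (by simpa using h) 0

-- Loop invariant: folding pvStepV over the remaining values, starting from the state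
-- describing an open segment `cur` (no ENTER inside), appends the reduced segments.
theorem pv_fold_eq (vs : List Int) :
    ∀ (acc : List (List Int)) (cur : List Int), (13 : Int) ∉ cur →
    (vs.foldl pvStepV (acc, (cur.length : Int), (cur.count 8 : Int))).1
      = acc ++ (pvSegments vs cur).map (fun seg => [(seg.count 8 : Int), (seg.length : Int)]) := by
  induction vs with
  | nil => intro acc cur _; simp [pvSegments]
  | cons v rest ih =>
    intro acc cur hcur
    by_cases hv : v = 13
    · subst hv
      have h1 : pvStepV (acc, (cur.length : Int), (cur.count 8 : Int)) (13 : Int)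
          = (acc ++ [[(cur.count 8 : Int), (cur.length : Int) + 1]], 0, 0) := by
        simp [pvStepV]
      have h2 := ih (acc ++ [[(cur.count 8 : Int), (cur.length : Int) + 1]]) [] (by simp)
      simp only [List.foldl_cons, h1]
      simp only [List.count_nil, Nat.cast_zero, List.length_nil] at h2
      rw [h2]
      simp [pvSegments, List.count_append, List.append_assoc]
    · have hv' : (v == (13 : Int)) = false := by simp [hv]
      by_cases h8 : v = 8
      · subst h8
        have h1 : pvStepV (acc, (cur.length : Int), (cur.count 8 : Int)) (8 : Int)
            = (acc, (((cur ++ [8]).length : Nat) : Int), (((cur ++ [8]).count 8 : Nat) : Int)) := by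
          simp [pvStepV, List.count_append]
        have h2 := ih acc (cur ++ [8]) (by simp [hcur])
        simp only [List.foldl_cons, h1, h2]
        simp [pvSegments]
      · have h1 : pvStepV (acc, (cur.length : Int), (cur.count 8 : Int)) v
            = (acc, (((cur ++ [v]).length : Nat) : Int), (((cur ++ [v]).count 8 : Nat) : Int)) := by
          have h8' : (v == (8 : Int)) = false := by simp [h8]
          simp [pvStepV, hv, List.count_append, List.count_singleton, h8']
        have h2 := ih acc (cur ++ [v]) (by simp [hcur]; exact fun h => hv h.symm)
        simp only [List.foldl_cons, h1, h2]
        simp [pvSegments, hv']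

-- ===== VERDICT (by name: the statement is the Claim_ definition above) =====
theorem backspace_count_spec : Claim_equal_backspace_count := by
  intro od _ hpre
  unfold Spec_backspace_count backspace_count backspace_count_alt
  have hcong : od.foldl
      (fun (st : List (List Int) × Int × Int) item =>
        let br := st.1
        let kc := st.2.1 + 1
        let bc := st.2.2
        let v := (PySem.Dict.mk od).getD item.1 0
        if v == 13 then (br ++ [[bc, kc]], 0, 0)
        else if v == 8 then (br, kc, bc + 1)
        else (br, kc, bc))
      ([], 0, 0)
      = od.foldl (fun st item => pvStepV st item.2) ([], 0, 0) := by
    apply PySem.List.foldl_congr_mem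
    intro st item hm
    simp only [pvStepV, pv_lookup_eq od hpre item hm]
  rw [hcong, ← List.foldl_map]
  have := pv_fold_eq (od.map Prod.snd) [] [] (by simp)
  simpa using this
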